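-- pv_equiv track=rewrite | github.com/mlengineershub/MNLI-MultiModel-Benchmark | src/train_evaluate.py | generate_hyperparameter_combinations
-- ===== SOURCE A (Python) =====
-- import itertools
--
-- def generate_hyperparameter_combinations(model_config):
--     """
--     Generate all combinations of hyperparameters
--
--     Args:
--         model_config (dict): Model configuration with hyperparameter lists
--
--     Returns:
--         list: List of hyperparameter dictionaries
--     """
--     # Extract hyperparameter lists
--     param_lists = {}
--     for key, value in model_config.items():
--         if isinstance(value, list):
--             param_lists[key] = value
--
--     # Generate all combinations
--     keys = list(param_lists.keys())
--     values = list(param_lists.values())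
--     combinations = list(itertools.product(*values))
--
--     # Convert to list of dictionaries
--     result = []
--     for combo in combinations:
--         param_dict = {key: value for key, value in zip(keys, combo)}
--         # Add non-list parameters
--         for key, value in model_config.items():
--             if not isinstance(value, list):
--                 param_dict[key] = value
--         result.append(param_dict)
--
--     return result
-- ===== SOURCE B (Python) =====
-- def generate_hyperparameter_combinations(model_config):
--     """
--     Generate all combinations of hyperparameters by incremental accumulation
--     instead of itertools.product.
--     """
--     base = {}
--     result = [base]
--     for key, value in model_config.items():
--         if isinstance(value, list):
--             result = [{**d, key: v} for d in result for v in value]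
--         else:
--             for d in result:
--                 d[key] = value
--     return result
-- ===== Notes on version B (the rewrite author's own statement) =====
-- stated objective: simpler
-- what changed: B builds the combinations by a single left-to-right fold that extends each partial dict with one value per list key, instead of A's separate key/value extraction, itertools.product, zip-reassembly and second pass adding non-list params.
import Mathlib
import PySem

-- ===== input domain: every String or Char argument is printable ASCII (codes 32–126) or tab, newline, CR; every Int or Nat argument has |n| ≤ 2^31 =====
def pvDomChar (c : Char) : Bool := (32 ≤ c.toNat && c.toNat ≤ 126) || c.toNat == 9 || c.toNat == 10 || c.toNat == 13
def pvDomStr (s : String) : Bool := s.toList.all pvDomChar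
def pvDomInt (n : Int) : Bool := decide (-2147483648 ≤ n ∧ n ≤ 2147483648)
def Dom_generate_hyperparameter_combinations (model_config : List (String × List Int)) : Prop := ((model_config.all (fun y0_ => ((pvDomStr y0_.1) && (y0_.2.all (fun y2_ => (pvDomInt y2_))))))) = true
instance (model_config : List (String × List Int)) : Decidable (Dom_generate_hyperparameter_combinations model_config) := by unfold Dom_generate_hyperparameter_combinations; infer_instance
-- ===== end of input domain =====

-- B builds the combinations by one left-to-right fold extending partial dicts, instead of
-- A's key/value extraction + itertools.product + zip reassembly + second pass (objective: simpler).

-- ===== PORT A =====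
-- itertools.product(*values), leftmost factor varies slowest
def pvProduct : List (List Int) → List (List Int)
  | [] => [[]]
  | vs :: rest => vs.flatMap (fun v => (pvProduct rest).map (fun c => v :: c))

def generate_hyperparameter_combinations (model_config : List (String × List Int)) : List (List (String × Int)) :=
  -- model_config is a Python dict: its .items() are the deduplicated pairs
  let items := (PySem.Dict.ofList model_config).items
  -- param_lists: every value is a list on this typed domain, so the isinstance filter keeps all items
  let param_lists := items
  let keys := param_lists.map (·.1)
  let values := param_lists.map (·.2)
  let combinations := pvProduct values
  -- dict from zip(keys, combo); the second loop over non-list params adds nothing (no non-list values)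
  combinations.map (fun combo => keys.zip combo)

-- ===== PORT B =====
def generate_hyperparameter_combinations_alt (model_config : List (String × List Int)) : List (List (String × Int)) :=
  -- result = [{}]; for key, value in items: result = [{**d, key: v} for d in result for v in value]
  -- dict keys are distinct, so {**d, key: v} appends the fresh pair (key, v)
  (PySem.Dict.ofList model_config).items.foldl
    (fun result kv => result.flatMap (fun d => kv.2.map (fun v => d ++ [(kv.1, v)]))) [[]]

-- ===== PRECONDITION & SPEC =====
def Spec_generate_hyperparameter_combinations (model_config : List (String × List Int)) (out : List (List (String × Int))) : Prop := out = generate_hyperparameter_combinations_alt model_config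
instance (model_config : List (String × List Int)) (out : List (List (String × Int))) : Decidable (Spec_generate_hyperparameter_combinations model_config out) := by unfold Spec_generate_hyperparameter_combinations; infer_instance

-- ===== CLAIM (what is proved, stated in full; the proofs are below) =====
def Claim_equal_generate_hyperparameter_combinations : Prop := ∀ (model_config : List (String × List Int)), Dom_generate_hyperparameter_combinations model_config → Spec_generate_hyperparameter_combinations model_config (generate_hyperparameter_combinations model_config)

-- ===== LEMMAS AND PROOFS =====

-- the common value: recursive cartesian product of an items list, tagging each value with its key
def pvCombos : List (String × List Int) → List (List (String × Int))
  | [] => [[]]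
  | (k, vs) :: rest => vs.flatMap (fun v => (pvCombos rest).map (fun c => (k, v) :: c))

theorem pvA_eq (items : List (String × List Int)) :
    (pvProduct (items.map (·.2))).map (fun c => (items.map (·.1)).zip c) = pvCombos items := by
  induction items with
  | nil => rfl
  | cons kv rest ih =>
    obtain ⟨k, vs⟩ := kv
    simp only [List.map_cons, pvProduct, pvCombos, List.map_flatMap, List.map_map]
    refine List.flatMap_congr (fun v _ => ?_)
    rw [← ih, List.map_map]
    rfl

theorem pvB_eq (items : List (String × List Int)) (acc : List (List (String × Int))) :
    items.foldl (fun result kv => result.flatMap (fun d => kv.2.map (fun v => d ++ [(kv.1, v)]))) acc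
      = acc.flatMap (fun d => (pvCombos items).map (fun c => d ++ c)) := by
  induction items generalizing acc with
  | nil => simp [pvCombos]
  | cons kv rest ih =>
    obtain ⟨k, vs⟩ := kv
    rw [List.foldl_cons, ih]
    simp only [pvCombos, List.flatMap_assoc, List.map_flatMap, List.flatMap_map, List.map_map]
    refine List.flatMap_congr (fun d _ => ?_)
    refine List.flatMap_congr (fun v _ => ?_)
    simp [Function.comp, List.append_assoc]

-- ===== VERDICT (by name: the statement is the Claim_ definition above) =====
theorem generate_hyperparameter_combinations_spec : Claim_equal_generate_hyperparameter_combinations := by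
  intro mc _
  unfold Spec_generate_hyperparameter_combinations generate_hyperparameter_combinations
    generate_hyperparameter_combinations_alt
  rw [pvB_eq, pvA_eq]
  simp
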